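-- pv_equiv track=rewrite | github.com/heeya15/Algorithm_Study | 221221/장예찬_boj_9935_문자열 폭발.py | solution
-- ===== SOURCE A (Python) =====
-- def solution(string, bomb):
--     bomb, bombLen = list(bomb), len(bomb)
--     stack = []
--     for c in string:
--         stack.append(c)
--         if stack[-bombLen:] == bomb:
--             for _ in range(bombLen):
--                 stack.pop()
--     return ''.join(stack) if stack else 'FRULA'
-- ===== SOURCE B (Python) =====
-- def solution(string, bomb):
--     if not bomb:
--         return string if string else 'FRULA'
--     m = len(bomb)
--     s = string
--     while True:
--         i = s.find(bomb)
--         if i == -1: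
--             break
--         s = s[:i] + s[i + m:]
--     return s if s else 'FRULA'
-- ===== Notes on version B (the rewrite author's own statement) =====
-- stated objective: faster
-- what changed: B abandons the character stack entirely: it repeatedly locates the leftmost bomb occurrence with str.find and splices it out (s[:i] + s[i+m:]) until none remains, which yields the same result because A's stack pops exactly the leftmost-ending (= leftmost) occurrence each time.
import Mathlib
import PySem

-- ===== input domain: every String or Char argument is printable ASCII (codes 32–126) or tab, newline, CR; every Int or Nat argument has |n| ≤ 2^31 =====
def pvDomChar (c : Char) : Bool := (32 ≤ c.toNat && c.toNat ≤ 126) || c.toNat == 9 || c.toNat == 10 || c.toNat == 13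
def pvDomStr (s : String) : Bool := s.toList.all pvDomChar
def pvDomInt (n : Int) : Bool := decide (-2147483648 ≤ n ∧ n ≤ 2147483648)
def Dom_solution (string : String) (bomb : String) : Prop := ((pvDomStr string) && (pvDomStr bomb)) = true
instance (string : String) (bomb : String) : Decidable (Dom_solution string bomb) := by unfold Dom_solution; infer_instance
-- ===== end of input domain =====

-- B replaces A's single-pass character stack by a different algorithm: repeatedly
-- find the leftmost bomb occurrence (str.find) and splice it out (objective: faster,
-- measured constant-factor: C-level find replaces A's per-character slice compare).

-- ===== PORT A =====
-- stack.pop() removes the last element; under the matched condition the stack has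
-- at least bombLen elements, so pop never hits an empty list here (dropLast is exact).
-- ''.join of a list of one-character strings is String.ofList.
def solution (string : String) (bomb : String) : String :=
  let bombL := bomb.toList
  let bombLen := bombL.length
  let stack : List Char :=
    string.toList.foldl (fun stack c =>
      let stack := stack ++ [c]
      if PySem.List.slice stack (some (-(bombLen : Int))) none == bombL then
        (List.range bombLen).foldl (fun st _ => st.dropLast) stack
      else stack) []
  if stack ≠ [] then String.ofList stack else "FRULA"

-- ===== PORT B =====
-- the while loop of Source B: find the leftmost occurrence, splice it out (s[:i] + s[i+m:]),
-- repeat until find returns -1.  Terminates because each splice removes bomb's length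
-- (nonzero) from s; hb carries that fact.
def solutionAltLoop (b : List Char) (hb : b ≠ []) (s : List Char) : List Char :=
  let i := PySem.Chars.find s b
  if _h : i = -1 then s
  else
    solutionAltLoop b hb
      (PySem.List.slice s none (some i) ++ PySem.List.slice s (some (i + (b.length : Int))) none)
termination_by s.length
decreasing_by
  have h0 : (0 : Int) ≤ PySem.Chars.find s b := by
    have := PySem.Chars.neg_one_le_find s b
    omega
  obtain ⟨hpre, -⟩ := PySem.Chars.find_spec (s := s) (sub := b) h0
  have hm : 0 < b.length := List.length_pos_iff.mpr hb
  have hlen : (PySem.Chars.find s b).toNat + b.length ≤ s.length := by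
    have := hpre.length_le
    simp at this
    omega
  rw [PySem.List.slice_to s h0, PySem.List.slice_from s (by positivity)]
  have he : (PySem.Chars.find s b + (b.length : Int)).toNat
      = (PySem.Chars.find s b).toNat + b.length := by omega
  rw [he]
  simp
  omega

-- empty bomb: Source B returns string (or 'FRULA') at once; otherwise run the loop.
def solution_alt (string : String) (bomb : String) : String :=
  if hb : bomb.toList = [] then (if string.toList = [] then "FRULA" else string)
  else
    let s := solutionAltLoop bomb.toList hb string.toList
    if s ≠ [] then String.ofList s else "FRULA"

-- ===== PRECONDITION & SPEC =====
def Spec_solution (string : String) (bomb : String) (out : String) : Prop := out = solution_alt string bomb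
instance (string : String) (bomb : String) (out : String) : Decidable (Spec_solution string bomb out) := by unfold Spec_solution; infer_instance

-- ===== CLAIM (what is proved, stated in full; the proofs are below) =====
def Claim_equal_solution : Prop := ∀ (string : String) (bomb : String), Dom_solution string bomb → Spec_solution string bomb (solution string bomb)

-- ===== LEMMAS AND PROOFS =====

-- A's loop, abstracted
def runA (b : List Char) (st s : List Char) : List Char :=
  s.foldl (fun stack c =>
    let stack := stack ++ [c]
    if PySem.List.slice stack (some (-(b.length : Int))) none == b then
      (List.range b.length).foldl (fun st _ => st.dropLast) stack
    else stack) st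

-- last-m-elements slice equals bomb iff bomb is a suffix
theorem drop_sub_eq_iff_suffix {α : Type} (s b : List α) :
    s.drop (s.length - b.length) = b ↔ b <:+ s := by
  constructor
  · intro h; exact h ▸ List.drop_suffix _ _
  · rintro ⟨t, rfl⟩
    have h : (t ++ b).length - b.length = t.length := by simp
    rw [h, List.drop_left]

-- iterated pop = take (length - k)
theorem foldl_dropLast_range {α : Type} (k : Nat) (l : List α) :
    (List.range k).foldl (fun st _ => st.dropLast) l = l.take (l.length - k) := by
  induction k with
  | zero => simp
  | succ n ih =>
    rw [List.range_succ, List.foldl_append, ih]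
    simp only [List.foldl_cons, List.foldl_nil, List.dropLast_eq_take, List.length_take]
    rw [List.take_take]
    congr 1
    omega

-- A's step in closed form (nonempty bomb)
theorem runA_step (b : List Char) (hb : b ≠ []) (st : List Char) (c : Char) :
    runA b st [c]
    = (if b <:+ st ++ [c] then (st ++ [c]).take ((st ++ [c]).length - b.length)
       else st ++ [c]) := by
  have hm : 0 < b.length := List.length_pos_iff.mpr hb
  show (if PySem.List.slice (st ++ [c]) (some (-(b.length : Int))) none == b then
      (List.range b.length).foldl (fun st _ => st.dropLast) (st ++ [c])
    else st ++ [c]) = _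
  rw [PySem.List.slice_from_neg_natCast _ _ hm, foldl_dropLast_range]
  by_cases h : b <:+ st ++ [c]
  · rw [if_pos (beq_iff_eq.mpr ((drop_sub_eq_iff_suffix _ _).mpr h)), if_pos h]
  · rw [if_neg (fun hc => h ((drop_sub_eq_iff_suffix _ _).mp (beq_iff_eq.mp hc))), if_neg h]

theorem runA_append (b st s t : List Char) :
    runA b st (s ++ t) = runA b (runA b st s) t := List.foldl_append ..

-- if b occurs nowhere in s (as an infix), A's loop from the empty stack never pops
theorem runA_no_occ (b : List Char) (hb : b ≠ []) (s : List Char)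
    (h : ¬ b <:+: s) : runA b [] s = s := by
  induction s using List.reverseRecOn with
  | nil => rfl
  | append_singleton t c ih =>
    have ht : ¬ b <:+: t := fun h' => h (h'.trans List.infix_append_left)
    rw [runA_append, ih ht, runA_step b hb, if_neg]
    · intro hsuf
      exact h hsuf.isInfix

-- a list strictly shorter than x ++ b that is a prefix of it cannot contain b,
-- when b first occurs in x ++ b at its very end
theorem no_infix_of_first (b x w : List Char)
    (hfirst : ∀ p, p <+: x ++ b → b <:+ p → p = x ++ b)
    (hw : w <+: x ++ b) (hlt : w.length < (x ++ b).length) : ¬ b <:+: w := by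
  rintro ⟨p, q, hpq⟩
  have hpw : p ++ b <+: w := ⟨q, by simpa using hpq⟩
  have heq := hfirst _ (hpw.trans hw) (List.suffix_append _ _)
  have h1 := congrArg List.length heq
  have h2 := hpw.length_le
  simp at h1 h2 hlt
  omega

-- removing the leftmost occurrence commutes with A's loop
theorem runA_first_occ (b : List Char) (hb : b ≠ []) (x y : List Char)
    (hfirst : ∀ p, p <+: x ++ b → b <:+ p → p = x ++ b) :
    runA b [] (x ++ b ++ y) = runA b [] (x ++ y) := by
  have hm : 0 < b.length := List.length_pos_iff.mpr hb
  have hnx : ¬ b <:+: x :=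
    no_infix_of_first b x x hfirst (List.prefix_append _ _) (by simp; omega)
  obtain ⟨b', c, rfl⟩ : ∃ b' c, b = b' ++ [c] := by
    rcases List.eq_nil_or_concat b with h | ⟨b', c, h⟩
    · exact absurd h hb
    · exact ⟨b', c, by simpa [List.concat_eq_append] using h⟩
  have hnxb' : ¬ (b' ++ [c]) <:+: (x ++ b') :=
    no_infix_of_first (b' ++ [c]) x (x ++ b') hfirst
      ⟨[c], by simp⟩ (by simp)
  have hrun_xb : runA (b' ++ [c]) [] (x ++ (b' ++ [c])) = x := by
    rw [show x ++ (b' ++ [c]) = (x ++ b') ++ [c] by simp,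
      runA_append, runA_no_occ _ hb _ hnxb', runA_step _ hb, if_pos (by simp)]
    simp
  calc runA (b' ++ [c]) [] (x ++ (b' ++ [c]) ++ y)
      = runA (b' ++ [c]) (runA (b' ++ [c]) [] (x ++ (b' ++ [c]))) y := runA_append ..
    _ = runA (b' ++ [c]) x y := by rw [hrun_xb]
    _ = runA (b' ++ [c]) (runA (b' ++ [c]) [] x) y := by rw [runA_no_occ _ hb _ hnx]
    _ = runA (b' ++ [c]) [] (x ++ y) := (runA_append ..).symm

-- an occurrence of b inside a prefix of s is an occurrence of b at a position of s
theorem prefix_drop_of_suffix_prefix (b p s : List Char) (hp : p <+: s) (hs : b <:+ p) :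
    b <+: s.drop (p.length - b.length) := by
  obtain ⟨q, rfl⟩ := hs
  obtain ⟨r, rfl⟩ := hp
  have : (q ++ b).length - b.length = q.length := by simp
  rw [this, List.append_assoc, List.drop_left]
  exact List.prefix_append _ _

-- A's loop computes B's leftmost-removal loop
theorem runA_eq_loop (b : List Char) (hb : b ≠ []) (s : List Char) :
    runA b [] s = solutionAltLoop b hb s := by
  rw [solutionAltLoop.eq_def]
  simp only
  by_cases h : PySem.Chars.find s b = -1
  · rw [dif_pos h]
    exact runA_no_occ b hb s ((PySem.Chars.find_eq_neg_one_iff s b).mp h)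
  · rw [dif_neg h]
    have h0 : 0 ≤ PySem.Chars.find s b := by
      have := PySem.Chars.neg_one_le_find s b
      omega
    obtain ⟨hpre, hmin⟩ := PySem.Chars.find_spec (s := s) (sub := b) h0
    set i := (PySem.Chars.find s b).toNat with hi
    have hlen : i + b.length ≤ s.length := by
      have hfl := PySem.Chars.find_le_length s b
      have := hpre.length_le
      rw [List.length_drop] at this
      omega
    obtain ⟨y, hy⟩ := hpre
    have hs : s = s.take i ++ b ++ y := by
      conv_lhs => rw [← List.take_append_drop i s, ← hy]
      simp
    have hxlen : (s.take i).length = i := by simp; omega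
    have hslice : PySem.List.slice s none (some (PySem.Chars.find s b)) ++
        PySem.List.slice s (some (PySem.Chars.find s b + (b.length : Int))) none
        = s.take i ++ y := by
      rw [PySem.List.slice_to s h0, PySem.List.slice_from s (by positivity)]
      have h2 : (PySem.Chars.find s b + (b.length : Int)).toNat = i + b.length := by omega
      rw [h2, ← hi]
      congr 1
      rw [hs]
      rw [show s.take i ++ b ++ y = (s.take i ++ b) ++ y by simp]
      rw [List.drop_append_of_le_length (by simp; omega)]
      simp [hxlen]
    rw [hslice, ← runA_eq_loop b hb (s.take i ++ y)]
    have hfirst : ∀ p, p <+: s.take i ++ b → b <:+ p → p = s.take i ++ b := by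
      intro p hp hsuf
      by_contra hne
      have hple : p.length ≤ i + b.length := by
        have := hp.length_le
        simpa [hxlen] using this
      have hplt : p.length < i + b.length := by
        rcases Nat.lt_or_ge p.length (i + b.length) with h' | h'
        · exact h'
        · exact absurd (hp.eq_of_length (by simp [hxlen]; omega)) hne
      have hblen : b.length ≤ p.length := hsuf.length_le
      have hps : p <+: s := hp.trans ⟨y, by conv_rhs => rw [hs]⟩
      have hocc := prefix_drop_of_suffix_prefix b p s hps hsuf
      exact hmin (p.length - b.length) (by omega) hocc
    calc runA b [] s = runA b [] (s.take i ++ b ++ y) := by rw [← hs]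
      _ = runA b [] (s.take i ++ y) := runA_first_occ b hb _ y hfirst
termination_by s.length
decreasing_by
  have hm : 0 < b.length := List.length_pos_iff.mpr hb
  have hylen := congrArg List.length hy
  simp at hylen
  simp only [List.length_append, List.length_take]
  omega

theorem solution_eq_alt (string bomb : String) :
    solution string bomb = solution_alt string bomb := by
  simp only [solution, solution_alt]
  by_cases hb : bomb.toList = []
  · -- empty bomb: A's slice condition is always false (the stack is nonempty after append)
    rw [dif_pos hb]
    have hstep : ∀ (s : List Char) (c : Char), c ∈ string.toList →
        (if PySem.List.slice (s ++ [c]) (some (-(bomb.toList.length : Int))) none == bomb.toList then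
            (List.range bomb.toList.length).foldl (fun st _ => st.dropLast) (s ++ [c])
          else s ++ [c]) = s ++ [c] := by
      intro s c _
      rw [hb]
      simp [pysem]
    rw [PySem.List.foldl_congr_mem _ _ _ _ hstep,
      PySem.List.foldl_append_singleton_eq_self]
    simp only [List.nil_append]
    by_cases hs : string.toList = []
    · simp [hs]
    · simp [hs, String.ofList_toList]
  · rw [dif_neg hb]
    have : runA bomb.toList [] string.toList = solutionAltLoop bomb.toList hb string.toList :=
      runA_eq_loop bomb.toList hb string.toList
    simp only [runA] at this
    rw [this]

-- ===== VERDICT (by name: the statement is the Claim_ definition above) =====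
theorem solution_spec : Claim_equal_solution := by
  intro string bomb _
  exact solution_eq_alt string bomb
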